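-- pv_equiv track=rewrite | github.com/ajy720/Algorithm | Programmers/level 2/땅따먹기.py | solution
-- ===== SOURCE A (Python) =====
-- def solution(land):
--     n = len(land)
--     dp = [[0] * 4 for i in range(n)]
--     dp[0] = land[0]
--
--     for i in range(1, n):
--         for j in range(4):
--             dp[i][j] = max([dp[i-1][k] + land[i][j]
--                             for k in range(4) if j != k])
--
--     return max(dp[-1])
-- ===== SOURCE B (Python) =====
-- def solution(land):
--     prev = land[0]
--     for row in land[1:]:
--         j1 = max(range(4), key=lambda j: prev[j])
--         m1 = prev[j1]
--         m2 = max(prev[j] for j in range(4) if j != j1)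
--         prev = [row[j] + (m2 if j == j1 else m1) for j in range(4)]
--     return max(prev)
-- ===== Notes on version B (the rewrite author's own statement) =====
-- stated objective: alternative
-- what changed: Replaces A's full n-by-4 DP table and its per-cell list-comprehension scan over the three other columns with a rolling row driven by a per-row summary of the previous row (argmax column, maximum, and second maximum): each new cell is filled in one pass from that summary instead of rescanning the other columns.
import Mathlib
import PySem

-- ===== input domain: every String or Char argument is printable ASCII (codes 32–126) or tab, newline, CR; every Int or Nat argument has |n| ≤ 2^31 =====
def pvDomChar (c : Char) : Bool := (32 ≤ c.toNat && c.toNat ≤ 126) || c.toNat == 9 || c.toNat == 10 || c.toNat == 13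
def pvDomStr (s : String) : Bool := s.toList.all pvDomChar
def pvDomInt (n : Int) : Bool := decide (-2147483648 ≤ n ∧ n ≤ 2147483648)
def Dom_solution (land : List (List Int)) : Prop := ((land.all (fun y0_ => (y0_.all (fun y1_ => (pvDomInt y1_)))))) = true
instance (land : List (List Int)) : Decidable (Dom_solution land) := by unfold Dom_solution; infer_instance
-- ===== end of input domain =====

-- B replaces A's full 2D DP table and its per-cell scan over the three other columns by a
-- per-row summary (argmax, max, second max) of the previous row, filling each new row in one
-- pass from that summary (objective: alternative).

-- ===== PORT A =====
-- inner loop body of A: fill row `init` (dp[i]) from dp[i-1] = `prev` and land[i] = `cur`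
def rowA (prev cur init : List Int) : List Int :=
  (PySem.List.pyRange 0 4 1).foldl (fun row j =>
    row.set j.toNat
      ((PySem.List.max?
          (((PySem.List.pyRange 0 4 1).filter (fun k => j != k)).map
            (fun k => (PySem.List.pyGet? prev k).getD 0 + (PySem.List.pyGet? cur j).getD 0))
          (fun y => y)).getD 0)) init

def solution (land : List (List Int)) : Int :=
  let n : Int := land.length
  let dp : List (List Int) := (PySem.List.pyRange 0 n 1).map (fun _ => ([0, 0, 0, 0] : List Int))
  let dp := dp.set 0 ((PySem.List.pyGet? land 0).getD [])
  let dp := (PySem.List.pyRange 1 n 1).foldl (fun dp i =>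
      dp.set i.toNat
        (rowA ((PySem.List.pyGet? dp (i - 1)).getD [])
              ((PySem.List.pyGet? land i).getD [])
              ((PySem.List.pyGet? dp i).getD []))) dp
  (PySem.List.max? ((PySem.List.pyGet? dp (-1)).getD []) (fun y => y)).getD 0

-- ===== PORT B =====
-- loop body of B: summarise prev by (argmax j1, its value m1, second max m2), then fill the
-- new row in one pass: column j takes row[j] + (m2 if j == j1 else m1)
def rowB (prev row : List Int) : List Int :=
  let j1 := (PySem.List.max? (PySem.List.pyRange 0 4 1)
      (fun j => (PySem.List.pyGet? prev j).getD 0)).getD 0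
  let m1 := (PySem.List.pyGet? prev j1).getD 0
  let m2 := (PySem.List.max?
      (((PySem.List.pyRange 0 4 1).filter (fun j => j != j1)).map
        (fun j => (PySem.List.pyGet? prev j).getD 0)) (fun y => y)).getD 0
  (PySem.List.pyRange 0 4 1).map
    (fun j => (PySem.List.pyGet? row j).getD 0 + (if j == j1 then m2 else m1))

def solution_alt (land : List (List Int)) : Int :=
  match land with
  | [] => 0  -- unreachable under Pre_ (Python raises on land[0])
  | first :: rest =>
    let prev := rest.foldl (fun prev row => rowB prev row) first
    (PySem.List.max? prev (fun y => y)).getD 0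

-- ===== PRECONDITION & SPEC =====
-- Pre_ is exactly the domain on which A returns normally: a nonempty grid, and when there
-- are at least two rows every row must have at least four columns (A raises IndexError
-- otherwise; only the first four columns of each row are ever combined).
def Pre_solution (land : List (List Int)) : Prop :=
  land ≠ [] ∧
    ((land.length = 1 ∧ land.headI ≠ []) ∨ (2 ≤ land.length ∧ ∀ row ∈ land, 4 ≤ row.length))

instance (land : List (List Int)) : Decidable (Pre_solution land) := by
  unfold Pre_solution; infer_instance

def pvWitness_solution : List (List Int) := [[1, 2, 3, 4], [4, 3, 2, 1], [1, 1, 1, 1]]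

def Spec_solution (land : List (List Int)) (out : Int) : Prop := out = solution_alt land
instance (land : List (List Int)) (out : Int) : Decidable (Spec_solution land out) := by unfold Spec_solution; infer_instance

-- ===== CLAIM (what is proved, stated in full; the proofs are below) =====
def Claim_equal_solution : Prop := ∀ (land : List (List Int)), Dom_solution land → Pre_solution land → Spec_solution land (solution land)

-- ===== LEMMAS AND PROOFS =====

theorem exists4 (p : List Int) (hp : 4 ≤ p.length) :
    ∃ a b c d t, p = a :: b :: c :: d :: t := by
  rcases p with _ | ⟨a, _ | ⟨b, _ | ⟨c, _ | ⟨d, t⟩⟩⟩⟩ <;> simp_all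

theorem max3 (x y z : Int) : (PySem.List.max? [x, y, z] (fun y => y)).getD 0 = max x (max y z) := by
  simp [PySem.List.max?]
  repeat (first | omega | split_ifs | simp_all)

theorem get0 (x0 x1 x2 x3 : Int) (t : List Int) :
    PySem.List.pyGet? (x0 :: x1 :: x2 :: x3 :: t) 0 = some x0 := by
  rw [show (0 : Int) = ((0 : Nat) : Int) from rfl, PySem.List.pyGet?_natCast]; rfl

theorem get1 (x0 x1 x2 x3 : Int) (t : List Int) :
    PySem.List.pyGet? (x0 :: x1 :: x2 :: x3 :: t) 1 = some x1 := by
  rw [show (1 : Int) = ((1 : Nat) : Int) by norm_num, PySem.List.pyGet?_natCast]; rfl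

theorem get2 (x0 x1 x2 x3 : Int) (t : List Int) :
    PySem.List.pyGet? (x0 :: x1 :: x2 :: x3 :: t) 2 = some x2 := by
  rw [show (2 : Int) = ((2 : Nat) : Int) by norm_num, PySem.List.pyGet?_natCast]; rfl

theorem get3 (x0 x1 x2 x3 : Int) (t : List Int) :
    PySem.List.pyGet? (x0 :: x1 :: x2 :: x3 :: t) 3 = some x3 := by
  rw [show (3 : Int) = ((3 : Nat) : Int) by norm_num, PySem.List.pyGet?_natCast]; rfl

theorem rowA_closed (tp tc : List Int) (p0 p1 p2 p3 c0 c1 c2 c3 : Int) :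
    rowA (p0 :: p1 :: p2 :: p3 :: tp) (c0 :: c1 :: c2 :: c3 :: tc) [0, 0, 0, 0]
      = [c0 + max p1 (max p2 p3), c1 + max p0 (max p2 p3),
         c2 + max p0 (max p1 p3), c3 + max p0 (max p1 p2)] := by
  have h4 : PySem.List.pyRange 0 4 1 = [0, 1, 2, 3] := by decide
  simp only [rowA, h4, List.foldl_cons, List.foldl_nil, List.filter_cons,
    List.filter_nil, get0, get1, get2, get3,
    Option.getD_some]
  norm_num [max3, get0, get1, get2, get3]
  rw [show Int.toNat 2 = 2 from rfl, show Int.toNat 3 = 3 from rfl,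
    show ∀ a b x y z : Int, [a, b, x, y].set 2 z = [a, b, z, y] from fun _ _ _ _ _ => rfl,
    show ∀ a b x y z : Int, [a, b, x, y].set 3 z = [a, b, x, z] from fun _ _ _ _ _ => rfl]
  simp only [List.cons.injEq, and_true]
  refine ⟨by omega, by omega, by omega, by omega⟩

theorem step_eq (tp tc : List Int) (p0 p1 p2 p3 c0 c1 c2 c3 : Int) :
    rowA (p0 :: p1 :: p2 :: p3 :: tp) (c0 :: c1 :: c2 :: c3 :: tc) [0, 0, 0, 0]
      = rowB (p0 :: p1 :: p2 :: p3 :: tp) (c0 :: c1 :: c2 :: c3 :: tc) := by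
  have h4 : PySem.List.pyRange 0 4 1 = [0, 1, 2, 3] := by decide
  rw [rowA_closed]
  simp only [rowB, h4, PySem.List.max?, List.foldl_cons, List.foldl_nil,
    get0, get1, get2, get3, Option.getD_some]
  by_cases h1 : p0 < p1
  · simp [h1, get0, get1, get2, get3]
    by_cases h2 : p1 < p2
    · simp [h2, get0, get1, get2, get3]
      by_cases h3 : p2 < p3
      · simp [h1, h2, h3, get0, get1, get2, get3]
        repeat' constructor
        all_goals (first | omega | ((repeat' split_ifs) <;> (try simp only [Option.getD_some]) <;> (try split_ifs) <;> (try simp only [Option.getD_some]) <;> omega))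
      · simp [h1, h2, h3, get0, get1, get2, get3]
        repeat' constructor
        all_goals (first | omega | ((repeat' split_ifs) <;> (try simp only [Option.getD_some]) <;> (try split_ifs) <;> (try simp only [Option.getD_some]) <;> omega))
    · simp [h2, get0, get1, get2, get3]
      by_cases h3 : p1 < p3
      · simp [h1, h2, h3, get0, get1, get2, get3]
        repeat' constructor
        all_goals (first | omega | ((repeat' split_ifs) <;> (try simp only [Option.getD_some]) <;> (try split_ifs) <;> (try simp only [Option.getD_some]) <;> omega))
      · simp [h1, h2, h3, get0, get1, get2, get3]
        repeat' constructor
        all_goals (first | omega | ((repeat' split_ifs) <;> (try simp only [Option.getD_some]) <;> (try split_ifs) <;> (try simp only [Option.getD_some]) <;> omega))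
  · simp [h1, get0, get1, get2, get3]
    by_cases h2 : p0 < p2
    · simp [h2, get0, get1, get2, get3]
      by_cases h3 : p2 < p3
      · simp [h1, h2, h3, get0, get1, get2, get3]
        repeat' constructor
        all_goals (first | omega | ((repeat' split_ifs) <;> (try simp only [Option.getD_some]) <;> (try split_ifs) <;> (try simp only [Option.getD_some]) <;> omega))
      · simp [h1, h2, h3, get0, get1, get2, get3]
        repeat' constructor
        all_goals (first | omega | ((repeat' split_ifs) <;> (try simp only [Option.getD_some]) <;> (try split_ifs) <;> (try simp only [Option.getD_some]) <;> omega))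
    · simp [h2, get0, get1, get2, get3]
      by_cases h3 : p0 < p3
      · simp [h1, h2, h3, get0, get1, get2, get3]
        repeat' constructor
        all_goals (first | omega | ((repeat' split_ifs) <;> (try simp only [Option.getD_some]) <;> (try split_ifs) <;> (try simp only [Option.getD_some]) <;> omega))
      · simp [h1, h2, h3, get0, get1, get2, get3]
        repeat' constructor
        all_goals (first | omega | ((repeat' split_ifs) <;> (try simp only [Option.getD_some]) <;> (try split_ifs) <;> (try simp only [Option.getD_some]) <;> omega))

theorem rowB_len (p0 p1 p2 p3 : Int) (tp row : List Int) :
    (rowB (p0 :: p1 :: p2 :: p3 :: tp) row).length = 4 := by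
  have h4 : PySem.List.pyRange 0 4 1 = [0, 1, 2, 3] := by decide
  simp [rowB, h4]

theorem chain_eq (rest : List (List Int)) (p : List Int) (hp : 4 ≤ p.length)
    (hr : ∀ r ∈ rest, 4 ≤ r.length) :
    rest.foldl (fun p c => rowA p c [0, 0, 0, 0]) p = rest.foldl (fun p c => rowB p c) p := by
  induction rest generalizing p with
  | nil => rfl
  | cons c rest ih =>
    obtain ⟨a, b, cc, d, tp, rfl⟩ := exists4 p hp
    obtain ⟨x, y, z, w, tc, rfl⟩ := exists4 c (hr _ (by simp))
    simp only [List.foldl_cons, step_eq]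
    exact ih _ (by rw [rowB_len]) (fun r hrr => hr r (by simp [hrr]))

theorem dp_fold (land : List (List Int)) :
    ∀ (m : Nat) (i : Int) (dp : List (List Int)) (p : List Int),
      1 ≤ i → i ≤ (land.length : Int) → ((land.length : Int) - i).toNat = m →
      dp.length = land.length →
      PySem.List.pyGet? dp (i - 1) = some p →
      (∀ k : Nat, i ≤ (k : Int) → (k : Int) < (land.length : Int) → dp[k]? = some [0, 0, 0, 0]) →
      ((PySem.List.pyRange i (land.length : Int) 1).foldl (fun dp i =>
          dp.set i.toNat
            (rowA ((PySem.List.pyGet? dp (i - 1)).getD [])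
                  ((PySem.List.pyGet? land i).getD [])
                  ((PySem.List.pyGet? dp i).getD []))) dp).length = land.length ∧
      PySem.List.pyGet? ((PySem.List.pyRange i (land.length : Int) 1).foldl (fun dp i =>
          dp.set i.toNat
            (rowA ((PySem.List.pyGet? dp (i - 1)).getD [])
                  ((PySem.List.pyGet? land i).getD [])
                  ((PySem.List.pyGet? dp i).getD []))) dp) ((land.length : Int) - 1)
        = some ((land.drop i.toNat).foldl (fun p c => rowA p c [0, 0, 0, 0]) p) := by
  intro m
  induction m with
  | zero =>
    intro i dp p h1 h2 hm hlen hget hz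
    have hin : i = (land.length : Int) := by omega
    subst hin
    rw [PySem.List.pyRange_one_eq_nil (le_refl _)]
    simp only [List.foldl_nil]
    refine ⟨hlen, ?_⟩
    have hdrop : land.drop (land.length : Int).toNat = [] := by
      apply List.drop_eq_nil_of_le; omega
    rw [hdrop]
    simpa using hget
  | succ m ih =>
    intro i dp p h1 h2 hm hlen hget hz
    have hilt : i < (land.length : Int) := by omega
    rw [PySem.List.pyRange_one_cons hilt]
    simp only [List.foldl_cons]
    have hidx : i.toNat < dp.length := by omega
    have hdpi : PySem.List.pyGet? dp i = some [0, 0, 0, 0] := by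
      rw [PySem.List.pyGet?_of_nonneg dp (by omega : (0 : Int) ≤ i)]
      have hk := hz i.toNat (by omega) (by omega)
      exact hk
    have hlandi : i.toNat < land.length := by omega
    have hcur : PySem.List.pyGet? land i = some land[i.toNat] :=
      PySem.List.pyGet?_eq_some_getElem land (by omega) (by omega)
    rw [hget, hdpi, hcur]
    simp only [Option.getD_some]
    have hres := ih (i + 1) (dp.set i.toNat (rowA p land[i.toNat] [0, 0, 0, 0]))
      (rowA p land[i.toNat] [0, 0, 0, 0]) (by omega) (by omega) (by omega)
      (by rw [List.length_set]; exact hlen)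
      (by
        have he : i + 1 - 1 = i := by omega
        rw [he, PySem.List.pyGet?_of_nonneg _ (by omega : (0 : Int) ≤ i)]
        exact List.getElem?_set_self hidx)
      (by
        intro k hk1 hk2
        rw [List.getElem?_set_ne (by omega)]
        exact hz k (by omega) hk2)
    have hdrop : land.drop i.toNat = land[i.toNat] :: land.drop (i.toNat + 1) :=
      (List.getElem_cons_drop hlandi).symm
    have htn : (i + 1).toNat = i.toNat + 1 := by omega
    rw [htn] at hres
    rw [hdrop, List.foldl_cons]
    exact hres

-- ===== VERDICT (by name: the statement is the Claim_ definition above) =====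
theorem solution_spec : Claim_equal_solution := by
  intro land hdom hpre
  obtain ⟨hne, hcase⟩ := hpre
  rcases land with _ | ⟨r0, rest⟩
  · exact absurd rfl hne
  unfold Spec_solution solution solution_alt
  simp only [PySem.List.pyGet?_zero_cons, Option.getD_some]
  have hlen1 : 1 ≤ ((r0 :: rest).length : Int) := by simp
  have hlen0 : (((PySem.List.pyRange 0 ((r0 :: rest).length : Int) 1).map
      (fun _ => ([0, 0, 0, 0] : List Int))).set 0 r0).length = (r0 :: rest).length := by
    simp [PySem.List.length_pyRange_one]
  have hget0 : PySem.List.pyGet? (((PySem.List.pyRange 0 ((r0 :: rest).length : Int) 1).map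
      (fun _ => ([0, 0, 0, 0] : List Int))).set 0 r0) (1 - 1) = some r0 := by
    have h0 : (1 : Int) - 1 = 0 := by norm_num
    rw [h0, PySem.List.pyGet?_zero]
    exact List.getElem?_set_self (by simp [PySem.List.length_pyRange_one])
  have hz0 : ∀ k : Nat, (1 : Int) ≤ (k : Int) → (k : Int) < ((r0 :: rest).length : Int) →
      (((PySem.List.pyRange 0 ((r0 :: rest).length : Int) 1).map
        (fun _ => ([0, 0, 0, 0] : List Int))).set 0 r0)[k]? = some [0, 0, 0, 0] := by
    intro k hk1 hk2
    rw [List.getElem?_set_ne (by omega), List.getElem?_map,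
      PySem.List.getElem?_pyRange_one]
    simp only [if_pos (by omega : k < (((r0 :: rest).length : Int) - 0).toNat)]
    rfl
  have key := dp_fold (r0 :: rest) (((r0 :: rest).length : Int) - 1).toNat 1 _ r0
    (by omega) hlen1 (by omega) hlen0 hget0 hz0
  obtain ⟨hlenF, hgetF⟩ := key
  have hlast : PySem.List.pyGet? ((PySem.List.pyRange 1 ((r0 :: rest).length : Int) 1).foldl
      (fun dp i =>
        dp.set i.toNat
          (rowA ((PySem.List.pyGet? dp (i - 1)).getD [])
                ((PySem.List.pyGet? (r0 :: rest) i).getD [])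
                ((PySem.List.pyGet? dp i).getD [])))
      (((PySem.List.pyRange 0 ((r0 :: rest).length : Int) 1).map
        (fun _ => ([0, 0, 0, 0] : List Int))).set 0 r0)) (-1)
      = some (((r0 :: rest).drop (1 : Int).toNat).foldl (fun p c => rowA p c [0, 0, 0, 0]) r0) := by
    rw [PySem.List.pyGet?_neg_ofNat _ 1 (by omega) (by omega)]
    rw [PySem.List.pyGet?_of_nonneg _ (by omega : (0 : Int) ≤ ((r0 :: rest).length : Int) - 1)] at hgetF
    have : (((r0 :: rest).length : Int) - 1).toNat = ((PySem.List.pyRange 1 ((r0 :: rest).length : Int) 1).foldl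
      (fun dp i =>
        dp.set i.toNat
          (rowA ((PySem.List.pyGet? dp (i - 1)).getD [])
                ((PySem.List.pyGet? (r0 :: rest) i).getD [])
                ((PySem.List.pyGet? dp i).getD [])))
      (((PySem.List.pyRange 0 ((r0 :: rest).length : Int) 1).map
        (fun _ => ([0, 0, 0, 0] : List Int))).set 0 r0)).length - 1 := by omega
    rw [← this]
    exact hgetF
  rw [hlast]
  simp only [Option.getD_some]
  have hchain : (((r0 :: rest).drop (1 : Int).toNat).foldl (fun p c => rowA p c [0, 0, 0, 0]) r0)
      = rest.foldl (fun p c => rowB p c) r0 := by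
    have hd : (r0 :: rest).drop (1 : Int).toNat = rest := rfl
    rw [hd]
    cases rest with
    | nil => rfl
    | cons r1 rs =>
      have hr : ∀ row ∈ (r0 :: r1 :: rs), 4 ≤ row.length := by
        rcases hcase with ⟨h1, _⟩ | ⟨_, hr⟩
        · simp at h1
        · exact hr
      exact chain_eq (r1 :: rs) r0 (hr r0 (by simp)) (fun r h => hr r (by simp [h]))
  rw [hchain]
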